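-- pv_equiv track=rewrite | github.com/nrb5089/mlcomm | mlcomm/deprecated/array_play_codebooks.py | findNls
-- ===== SOURCE A (Python) =====
-- def findNls(N):
--     B = []
--     B.append(N)
--     while N/2 > 1:
--         B.append(int(N/2))
--         N = N/2
--     B.reverse()
--     return B
-- ===== SOURCE B (Python) =====
-- def findNls(N):
--     # Build the ascending list of successive halvings directly by recursion
--     # (no accumulate-then-reverse loop).  p is the current power-of-two divisor;
--     # since |N| <= 2**31 the exact halving N/2**k matches integer floor division.
--     def asc(p):
--         if N > p:
--             return asc(2 * p) + [N // p]
--         return []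
--     return asc(2) + [N]
-- ===== Notes on version B (the rewrite author's own statement) =====
-- stated objective: alternative
-- what changed: Replaces the append-then-reverse while loop over a mutated float value with a direct recursion over the power-of-two divisor that builds the ascending list front-first, with no reverse and no mutation.
import Mathlib
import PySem

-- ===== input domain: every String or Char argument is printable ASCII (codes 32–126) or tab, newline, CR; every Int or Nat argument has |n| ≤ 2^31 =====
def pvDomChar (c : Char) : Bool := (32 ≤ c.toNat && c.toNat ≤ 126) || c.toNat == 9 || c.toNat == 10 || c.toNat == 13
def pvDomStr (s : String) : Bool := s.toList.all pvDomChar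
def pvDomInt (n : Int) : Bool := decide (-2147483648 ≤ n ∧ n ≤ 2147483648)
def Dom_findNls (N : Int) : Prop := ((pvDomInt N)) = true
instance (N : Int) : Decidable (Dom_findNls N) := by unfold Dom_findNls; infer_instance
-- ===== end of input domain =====

-- B builds the ascending halvings by direct recursion (no reverse); no float mutation.

-- ===== PORT A =====
-- A's loop mutates a float: after k iterations the variable holds N/2^k exactly
-- (|N| ≤ 2^31 so every such dyadic value is an exact float).  The port carries the
-- exponent e instead of the float: the loop condition 'N/2 > 1' on the current value
-- N/2^e is exactly 'N > 2^(e+1)', and 'int(N/2)' is truncation toward zero,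
-- Int.tdiv N (2^(e+1)).  The while loop is run on fuel N.natAbs, which exceeds the
-- number of halvings ever needed; this is exact on every input.
def findNlsLoop (N : Int) (e : Nat) (B : List Int) (fuel : Nat) : List Int :=
  match fuel with
  | 0 => B
  | fuel + 1 =>
    if N > 2 ^ (e + 1) then
      findNlsLoop N (e + 1) (B ++ [Int.tdiv N (2 ^ (e + 1))]) fuel
    else B

def findNls (N : Int) : List Int :=
  (findNlsLoop N 0 [N] N.natAbs).reverse

-- ===== PORT B =====
-- Source B's divisor p is always the power 2^(e+1); the port carries the exponent e
-- (p = 2^(e+1)) so the doubling recursion is structurally terminating.  For the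
-- divisions reached (N > p > 0), Python's '//' is Int.tdiv.
def ascHalves (N : Int) (e : Nat) : List Int :=
  if N > 2 ^ (e + 1) then
    ascHalves N (e + 1) ++ [Int.tdiv N (2 ^ (e + 1))]
  else []
termination_by (N.toNat - 2 ^ (e + 1))
decreasing_by
  have h2 : (2:Nat) ^ (e + 1) < N.toNat := by
    have : ((2:Nat) ^ (e + 1) : Int) = (2:Int) ^ (e + 1) := by push_cast; ring
    omega
  have h3 : (2:Nat) ^ (e + 1) < 2 ^ (e + 1 + 1) :=
    Nat.pow_lt_pow_right (by norm_num) (by omega)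
  omega

def findNls_alt (N : Int) : List Int :=
  ascHalves N 0 ++ [N]

-- ===== PRECONDITION & SPEC =====
def Spec_findNls (N : Int) (out : List Int) : Prop := out = findNls_alt N
instance (N : Int) (out : List Int) : Decidable (Spec_findNls N out) := by unfold Spec_findNls; infer_instance

-- ===== CLAIM =====
def Claim_equal_findNls : Prop := ∀ (N : Int), Dom_findNls N → Spec_findNls N (findNls N)

-- ===== LEMMAS AND PROOFS =====
-- With enough fuel the accumulator loop of A produces exactly B's ascending list, reversed.
lemma findNlsLoop_eq (N : Int) :
    ∀ (fuel e : Nat) (B : List Int), N ≤ 2 ^ (e + 1) + fuel →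
      findNlsLoop N e B fuel = B ++ (ascHalves N e).reverse := by
  intro fuel
  induction fuel with
  | zero =>
    intro e B h
    have hstop : ¬ N > 2 ^ (e + 1) := by omega
    simp [findNlsLoop, ascHalves, hstop]
  | succ fuel ih =>
    intro e B h
    by_cases hc : N > 2 ^ (e + 1)
    · have hpow : (2:Int) ^ (e + 1 + 1) = 2 * 2 ^ (e + 1) := by ring
      have hge : (2:Int) ≤ 2 ^ (e + 1) := by
        calc (2:Int) = 2 ^ 1 := by norm_num
        _ ≤ 2 ^ (e + 1) := by
          apply pow_le_pow_right₀ (by norm_num) (by omega)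
      have hfuel : N ≤ 2 ^ (e + 1 + 1) + fuel := by omega
      rw [findNlsLoop, if_pos hc, ih (e + 1) _ hfuel]
      conv_rhs => rw [ascHalves, if_pos hc]
      simp
    · rw [findNlsLoop, if_neg hc, ascHalves, if_neg hc]
      simp

-- ===== VERDICT =====
theorem findNls_spec : Claim_equal_findNls := by
  intro N _
  unfold Spec_findNls findNls findNls_alt
  have hfuel : N ≤ 2 ^ (0 + 1) + (N.natAbs : Int) := by omega
  rw [findNlsLoop_eq N N.natAbs 0 [N] hfuel]
  simp
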